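-- pv_equiv track=rewrite | github.com/guedes674/PL2025-A97369 | TPC2/tpc2.py | obras_periodo
-- ===== SOURCE A (Python) =====
-- def obras_periodo(dict):
--     periodo_obra = {}
--     for obra in dict.values():
--         periodo = obra[2]
--         titulo = obra[0]
--         if periodo not in periodo_obra:
--             periodo_obra[periodo] = []
--         periodo_obra[periodo].append(titulo)
--
--     for periodo in periodo_obra:
--         periodo_obra[periodo].sort()
--
--     return periodo_obra
-- ===== SOURCE B (Python) =====
-- def obras_periodo(dict):
--     result = {}
--     pairs = []
--     for obra in dict.values():
--         periodo = obra[2]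
--         result.setdefault(periodo, [])
--         pairs.append((obra[0], periodo))
--     pairs.sort(key=lambda p: p[0])
--     for titulo, periodo in pairs:
--         result[periodo].append(titulo)
--     return result
-- ===== Notes on version B (the rewrite author's own statement) =====
-- stated objective: alternative
-- what changed: A groups titles per period and then sorts each period's list separately; B seeds the periods in first-appearance order, sorts all (title, period) pairs once globally by title, and distributes them stably, so no per-group sort is needed.
import Mathlib
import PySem

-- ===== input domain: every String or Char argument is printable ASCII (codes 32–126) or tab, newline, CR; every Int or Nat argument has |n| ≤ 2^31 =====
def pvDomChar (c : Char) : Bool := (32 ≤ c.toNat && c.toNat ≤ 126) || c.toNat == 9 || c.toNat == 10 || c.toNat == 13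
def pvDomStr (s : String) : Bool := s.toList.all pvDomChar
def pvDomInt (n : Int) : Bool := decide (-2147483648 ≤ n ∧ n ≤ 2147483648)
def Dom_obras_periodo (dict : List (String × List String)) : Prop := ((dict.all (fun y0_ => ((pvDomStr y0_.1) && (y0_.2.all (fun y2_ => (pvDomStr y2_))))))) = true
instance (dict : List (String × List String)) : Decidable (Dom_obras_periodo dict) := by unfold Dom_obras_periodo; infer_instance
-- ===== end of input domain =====

-- B replaces A's per-period list sort by ONE global sort of (title, period) pairs distributed
-- stably over the seeded periods (objective: alternative decomposition, same observable result).

-- ===== PORT A =====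
def obras_periodo (dict : List (String × List String)) : List (String × List String) :=
  let d0 := PySem.Dict.ofList dict
  let periodo_obra := d0.values.foldl
    (fun (po : PySem.Dict String (List String)) obra =>
      let periodo := PySem.List.pyGetD obra 2 ""
      let titulo := PySem.List.pyGetD obra 0 ""
      let po := if po.contains periodo then po else po.insert periodo []
      po.modify periodo [] (fun l => l ++ [titulo]))
    PySem.Dict.empty
  let periodo_obra2 := periodo_obra.keys.foldl
    (fun po periodo => po.modify periodo [] (fun l => PySem.List.sorted l (fun x => x) false))
    periodo_obra
  periodo_obra2.items

-- ===== PORT B =====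
def obras_periodo_alt (dict : List (String × List String)) : List (String × List String) :=
  let d0 := PySem.Dict.ofList dict
  let st := d0.values.foldl
    (fun (st : PySem.Dict String (List String) × List (String × String)) obra =>
      (st.1.setdefault (PySem.List.pyGetD obra 2 "") [],
       st.2 ++ [(PySem.List.pyGetD obra 0 "", PySem.List.pyGetD obra 2 "")]))
    (PySem.Dict.empty, [])
  let pairs := PySem.List.sorted st.2 (fun p => p.1) false
  let result := pairs.foldl (fun d p => d.modify p.2 [] (fun l => l ++ [p.1])) st.1
  result.items

-- ===== PRECONDITION & SPEC =====
-- Pre_ excludes exactly the inputs on which Python A raises IndexError: a dict whose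
-- (effective, post-key-collapse) value list has fewer than 3 elements (obra[2]/obra[0]).
def Pre_obras_periodo (dict : List (String × List String)) : Prop :=
  ∀ o ∈ (PySem.Dict.ofList dict).values, 3 ≤ o.length
instance (dict : List (String × List String)) : Decidable (Pre_obras_periodo dict) := by
  unfold Pre_obras_periodo; infer_instance

def pvWitness_obras_periodo : (List (String × List String)) :=
  [("obra1", ["T", "x", "P"]), ("obra2", ["S", "y", "P"])]

def Spec_obras_periodo (dict : List (String × List String)) (out : List (String × List String)) : Prop := out = obras_periodo_alt dict
instance (dict : List (String × List String)) (out : List (String × List String)) : Decidable (Spec_obras_periodo dict out) := by unfold Spec_obras_periodo; infer_instance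

-- ===== CLAIM (what is proved, stated in full; the proofs are below) =====
def Claim_equal_obras_periodo : Prop := ∀ (dict : List (String × List String)), Dom_obras_periodo dict → Pre_obras_periodo dict → Spec_obras_periodo dict (obras_periodo dict)

-- ===== LEMMAS AND PROOFS =====

-- the (title, period) pairs both programs extract, in dict order
def pvPairs (vals : List (List String)) : List (String × String) :=
  vals.map (fun o => (PySem.List.pyGetD o 0 "", PySem.List.pyGetD o 2 ""))

-- A's seed-then-append body collapses to a single modify
lemma body_eq_modify (d : PySem.Dict String (List String)) (p t : String) :
    (if d.contains p then d else d.insert p []).modify p [] (fun l => l ++ [t])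
      = d.modify p [] (fun l => l ++ [t]) := by
  by_cases h : d.contains p
  · simp [h]
  · simp [PySem.Dict.modify, PySem.Dict.getD_insert_self,
      PySem.Dict.insert_insert_self, PySem.Dict.getD_of_not_contains, h]

-- grouping loop keyed on the second component: value at c
lemma groupfold_getD (ts : List (String × String)) (d : PySem.Dict String (List String)) (c : String) :
    (ts.foldl (fun d q => d.modify q.2 [] (fun l => l ++ [q.1])) d).getD c []
      = d.getD c [] ++ (ts.filter (fun q => q.2 == c)).map (fun q => q.1) := by
  have h := PySem.Dict.getD_foldl_modify_append (ts.map Prod.swap) d c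
  rw [List.foldl_map] at h
  simp only [Prod.swap] at h
  rw [h, List.filter_map]
  simp [Function.comp_def]

-- sorting loop over a Nodup key list: value at c
lemma sortfold_getD (ks : List String) (d : PySem.Dict String (List String)) (c : String)
    (h : ks.Nodup) :
    (ks.foldl (fun po k => po.modify k [] (fun l => PySem.List.sorted l (fun x => x) false)) d).getD c []
      = if c ∈ ks then PySem.List.sorted (d.getD c []) (fun x => x) false else d.getD c [] := by
  induction ks generalizing d with
  | nil => simp
  | cons k ks ih =>
    simp only [List.nodup_cons] at h
    rw [List.foldl_cons, ih _ h.2]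
    by_cases hc : c ∈ ks
    · have hck : c ≠ k := fun e => h.1 (e ▸ hc)
      rw [PySem.Dict.getD_modify_of_ne d [] _ hck]
      simp [hc]
    · by_cases hck : c = k
      · subst hck; rw [PySem.Dict.getD_modify_self]; simp [hc]
      · rw [PySem.Dict.getD_modify_of_ne d [] _ hck]; simp [hc, hck]

-- seeding loop: keys accumulate, values unchanged
lemma seedfold_getD (ps : List String) (d : PySem.Dict String (List String)) (c : String) :
    (ps.foldl (fun d p => d.setdefault p []) d).getD c [] = d.getD c [] := by
  induction ps generalizing d with
  | nil => rfl
  | cons p ps ih =>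
    rw [List.foldl_cons, ih]
    by_cases h : d.contains p
    · rw [PySem.Dict.setdefault_of_contains d [] h]
    · rw [PySem.Dict.setdefault_of_not_contains d [] (by simpa using h)]
      by_cases hc : c = p
      · subst hc
        simp [PySem.Dict.getD_insert_self, PySem.Dict.getD_of_not_contains d [] (by simpa using h)]
      · rw [PySem.Dict.getD_insert_of_ne d [] [] hc]

lemma seedfold_keys (ps : List String) (d : PySem.Dict String (List String)) :
    (ps.foldl (fun d p => d.setdefault p []) d).keys = PySem.Set.update d.keys ps := by
  induction ps generalizing d with
  | nil => rfl
  | cons p ps ih =>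
    rw [List.foldl_cons, ih, PySem.Set.update_cons]
    congr 1
    by_cases h : d.contains p
    · rw [PySem.Dict.setdefault_of_contains d [] h,
        PySem.Set.add_of_mem (by simpa [PySem.Dict.contains_iff_mem_keys] using h)]
    · rw [PySem.Dict.setdefault_of_not_contains d [] (by simpa using h),
        PySem.Dict.keys_insert_of_not_contains d [] (by simpa using h),
        PySem.Set.add_of_not_mem (by simpa [PySem.Dict.contains_iff_mem_keys] using h)]

-- updating a Nodup set with elements it already has changes nothing
lemma update_of_subset (s : PySem.Set String) (xs : List String) (hsub : ∀ x ∈ xs, x ∈ s) :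
    PySem.Set.update s xs = s := by
  rw [PySem.Set.update_eq_append_filter]
  have : (PySem.Set.ofList xs).filter (fun y => !s.contains y) = [] := by
    rw [List.filter_eq_nil_iff]
    intro a ha
    simp only [Bool.not_eq_true', Bool.not_eq_false]
    exact (PySem.Set.contains_iff _ _).mpr (hsub a (by simpa [PySem.Set.mem_ofList] using ha))
  rw [this, List.append_nil]

-- the heart: filtering a globally title-sorted pair list gives each period's sorted titles
lemma sorted_filter_map (ts : List (String × String)) (c : String) :
    ((PySem.List.sorted ts (fun p => p.1) false).filter (fun q => q.2 == c)).map (fun q => q.1)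
      = PySem.List.sorted ((ts.filter (fun q => q.2 == c)).map (fun q => q.1)) (fun x => x) false := by
  apply PySem.List.eq_of_perm_of_pairwise_le_of_injective (fun x => x) (fun _ _ h => h)
  · exact ((PySem.List.sorted_perm ts (fun p => p.1) false).filter _ |>.map _).trans
      (PySem.List.sorted_perm _ _ _).symm
  · exact (List.pairwise_map).mpr ((PySem.List.sorted_pairwise ts (fun p => p.1)).filter _)
  · exact PySem.List.sorted_pairwise _ _

lemma pairs_snd_mem (ts : List (String × String)) (x : String)
    (hx : x ∈ (PySem.List.sorted ts (fun p => p.1) false).map (fun q => q.2)) :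
    x ∈ PySem.Set.ofList (ts.map (fun q => q.2)) := by
  rw [PySem.Set.mem_ofList, List.mem_map] at *
  obtain ⟨q, hq, rfl⟩ := hx
  exact ⟨q, (PySem.List.sorted_perm ts (fun p => p.1) false).mem_iff.mp hq, rfl⟩

theorem obras_periodo_eq_alt (dict : List (String × List String)) :
    obras_periodo dict = obras_periodo_alt dict := by
  unfold obras_periodo obras_periodo_alt
  dsimp only
  rw [PySem.List.foldl_prod_mk
    (fun (d : PySem.Dict String (List String)) obra => d.setdefault (PySem.List.pyGetD obra 2 "") [])
    (fun (l : List (String × String)) obra => l ++ [(PySem.List.pyGetD obra 0 "", PySem.List.pyGetD obra 2 "")])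
    (PySem.Dict.ofList dict).values PySem.Dict.empty []]
  dsimp only
  have hA1 : ((PySem.Dict.ofList dict).values.foldl
      (fun (po : PySem.Dict String (List String)) obra =>
        let periodo := PySem.List.pyGetD obra 2 ""
        let titulo := PySem.List.pyGetD obra 0 ""
        let po' := if po.contains periodo then po else po.insert periodo []
        po'.modify periodo [] (fun l => l ++ [titulo])) PySem.Dict.empty)
      = (pvPairs (PySem.Dict.ofList dict).values).foldl
          (fun d q => d.modify q.2 [] (fun l => l ++ [q.1])) PySem.Dict.empty := by
    rw [pvPairs, List.foldl_map]
    congr 1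
    funext po obra
    exact body_eq_modify po _ _
  have hSeed : ((PySem.Dict.ofList dict).values.foldl
      (fun (d : PySem.Dict String (List String)) obra =>
        d.setdefault (PySem.List.pyGetD obra 2 "") []) PySem.Dict.empty)
      = ((pvPairs (PySem.Dict.ofList dict).values).map (fun q => q.2)).foldl
          (fun d p => d.setdefault p []) PySem.Dict.empty := by
    rw [pvPairs, List.map_map, List.foldl_map]
    rfl
  have hPairsRaw : ((PySem.Dict.ofList dict).values.foldl
      (fun (l : List (String × String)) obra =>
        l ++ [(PySem.List.pyGetD obra 0 "", PySem.List.pyGetD obra 2 "")]) [])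
      = pvPairs (PySem.Dict.ofList dict).values := by
    rw [PySem.List.foldl_append_singleton_eq_map, List.nil_append, pvPairs]
  rw [hA1, hSeed, hPairsRaw]
  set ts := pvPairs (PySem.Dict.ofList dict).values with hts
  set P := PySem.Set.ofList (ts.map (fun q => q.2)) with hP
  have hPnodup : P.Nodup := PySem.Set.nodup_ofList _
  -- A side
  have hA1keys : ((ts.foldl (fun d q => d.modify q.2 [] (fun l => l ++ [q.1]))
      PySem.Dict.empty)).keys = P := by
    rw [PySem.Dict.keys_foldl_modify_key ts (fun q => q.2) [] (fun _ q => (fun l => l ++ [q.1]))]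
    simp only [PySem.Dict.keys_empty, PySem.Set.update_nil_left, hP]
  have hA2keys : ((((ts.foldl (fun d q => d.modify q.2 [] (fun l => l ++ [q.1]))
      PySem.Dict.empty)).keys).foldl
        (fun po k => po.modify k [] (fun l => PySem.List.sorted l (fun x => x) false))
        ((ts.foldl (fun d q => d.modify q.2 [] (fun l => l ++ [q.1])) PySem.Dict.empty))).keys
      = P := by
    rw [PySem.Dict.keys_foldl_modify_key _ (fun k => k) []
      (fun _ _ => (fun l => PySem.List.sorted l (fun x => x) false)), hA1keys, List.map_id' P]
    exact update_of_subset P P (fun x hx => hx)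
  -- B side
  have hSeedkeys : (((ts.map (fun q => q.2)).foldl (fun (d : PySem.Dict String (List String)) p => d.setdefault p [])
      PySem.Dict.empty)).keys = P := by
    rw [seedfold_keys]
    simp only [PySem.Dict.keys_empty, PySem.Set.update_nil_left, hP]
  have hBkeys : (((PySem.List.sorted ts (fun p => p.1) false).foldl
      (fun d p => d.modify p.2 [] (fun l => l ++ [p.1]))
      ((ts.map (fun q => q.2)).foldl (fun (d : PySem.Dict String (List String)) p => d.setdefault p []) PySem.Dict.empty))).keys
      = P := by
    rw [PySem.Dict.keys_foldl_modify_key (PySem.List.sorted ts (fun p => p.1) false) (fun q => q.2) [] (fun _ q => (fun l => l ++ [q.1])),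
      hSeedkeys]
    exact update_of_subset P _ (fun x hx => pairs_snd_mem ts x (by simpa using hx))
  rw [PySem.Dict.items_eq_map_keys _ (hA2keys ▸ hPnodup) [],
      PySem.Dict.items_eq_map_keys _ (hBkeys ▸ hPnodup) [], hA2keys, hBkeys]
  apply List.map_congr_left
  intro k hk
  have hAval : (((ts.foldl (fun d q => d.modify q.2 [] (fun l => l ++ [q.1]))
      PySem.Dict.empty)).keys.foldl
        (fun po p => po.modify p [] (fun l => PySem.List.sorted l (fun x => x) false))
        ((ts.foldl (fun d q => d.modify q.2 [] (fun l => l ++ [q.1])) PySem.Dict.empty))).getD k []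
      = PySem.List.sorted ((ts.filter (fun q => q.2 == k)).map (fun q => q.1)) (fun x => x) false := by
    rw [sortfold_getD _ _ _ (hA1keys ▸ hPnodup), hA1keys, groupfold_getD]
    simp [hk]
  have hBval : (((PySem.List.sorted ts (fun p => p.1) false).foldl
      (fun d p => d.modify p.2 [] (fun l => l ++ [p.1]))
      ((ts.map (fun q => q.2)).foldl (fun (d : PySem.Dict String (List String)) p => d.setdefault p []) PySem.Dict.empty))).getD k []
      = PySem.List.sorted ((ts.filter (fun q => q.2 == k)).map (fun q => q.1)) (fun x => x) false := by
    rw [groupfold_getD, seedfold_getD]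
    simp [sorted_filter_map ts k]
  rw [hAval, hBval]

-- ===== VERDICT (by name: the statement is the Claim_ definition above) =====
theorem obras_periodo_spec : Claim_equal_obras_periodo := by
  intro dict _ _
  unfold Spec_obras_periodo
  exact obras_periodo_eq_alt dict
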